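-- pv_equiv track=rewrite | github.com/rafibz007/AlgorithmsAndDataStructures | All-Unorganised/Exercises/Cw7/zad obow a.py | tank_a
-- ===== SOURCE A (Python) =====
-- def tank_a( P, S, L ):
--     counter = 0
--     R = []
--     """
--     Na kazdej stacji tankujemy do pelna i jedziemy tak daleko jak damy rade
--
--     Jezeli nasze optymalne rozwiazanie w pierwszym kroku nie jedzie tak daleko jak da rade, a my ten ruch wykonamy
--     znaczy to ze skoro z poprzedniej stacji dalo sie wskoczyc na optymalne rozwiazanie, to z pola dalszego tez damy rade
--     wiec odtworzymy to najlepsze rozwiazanie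
--     """
--
--     n = len(S)
--     i = 0
--     R.append(i)
--     while i < n-1:
--         k = 1
--         while i+k+1 <= n-1 and S[i+k+1] - S[i] <= L: k+=1
--         i += k
--         counter += 1
--         R.append(i)
--
--     return counter, R
-- ===== SOURCE B (Python) =====
-- def tank_a(P, S, L):
--     # Single left-to-right pass: walk every index once; whenever the next
--     # station falls out of range of the current stop, the previous index
--     # becomes the new stop (this also reproduces the forced >=1-station hop).
--     n = len(S)
--     R = [0]
--     counter = 0
--     i = 0
--     for j in range(2, n):
--         if S[j] - S[i] > L:
--             i = j - 1
--             counter += 1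
--             R.append(i)
--     if n > 1 and i < n - 1:
--         counter += 1
--         R.append(n - 1)
--     return counter, R
-- ===== Notes on version B (the rewrite author's own statement) =====
-- stated objective: simpler
-- what changed: Replaced A's nested while-loops (outer loop over stops with an inner frontier-advancing scan) by a single flat for-loop over all indices that records a stop exactly when the scanned station falls out of range, plus one final append for the last station.
import Mathlib
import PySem

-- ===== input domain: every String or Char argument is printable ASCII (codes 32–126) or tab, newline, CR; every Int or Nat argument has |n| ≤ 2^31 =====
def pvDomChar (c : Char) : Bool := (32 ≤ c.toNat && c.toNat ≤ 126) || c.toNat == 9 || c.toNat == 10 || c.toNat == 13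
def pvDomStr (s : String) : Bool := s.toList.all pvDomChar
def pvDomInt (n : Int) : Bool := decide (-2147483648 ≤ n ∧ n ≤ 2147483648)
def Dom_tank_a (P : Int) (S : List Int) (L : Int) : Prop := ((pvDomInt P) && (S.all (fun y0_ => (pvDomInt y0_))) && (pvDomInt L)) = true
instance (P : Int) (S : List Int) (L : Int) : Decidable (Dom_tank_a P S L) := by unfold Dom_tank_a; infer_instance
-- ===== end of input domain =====

-- B replaces A's nested while-loops by one flat pass over all indices; same results, same O(n) cost.

-- ===== PORT A =====
-- inner 'while i+k+1 <= n-1 and S[i+k+1] - S[i] <= L: k += 1'.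
-- The fuel only makes the loop total: it is provably sufficient (lemma tank_a_inner_fuel_le
-- below: the loop's guard fails before the port's fuel runs out), so the 0-case is never the
-- reason the loop stops.  The guard keeps every index in range, so pyGetD's default is unused.
def tank_a_inner (S : List Int) (L n i : Int) (k : Int) : Nat → Int
  | 0 => k
  | fuel + 1 =>
    if i + k + 1 ≤ n - 1 ∧ PySem.List.pyGetD S (i + k + 1) 0 - PySem.List.pyGetD S i 0 ≤ L then
      tank_a_inner S L n i (k + 1) fuel
    else k

-- outer 'while i < n-1: k = 1; <inner>; i += k; counter += 1; R.append(i)' (same fuel discipline)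
def tank_a_outer (S : List Int) (L n i counter : Int) (R : List Int) : Nat → Int × List Int
  | 0 => (counter, R)
  | fuel + 1 =>
    if i < n - 1 then
      tank_a_outer S L n (i + tank_a_inner S L n i 1 n.toNat) (counter + 1)
        (R ++ [i + tank_a_inner S L n i 1 n.toNat]) fuel
    else (counter, R)

def tank_a (P : Int) (S : List Int) (L : Int) : Int × List Int :=
  tank_a_outer S L (S.length : Int) 0 0 [0] S.length

-- ===== PORT B =====
-- body of Source B's single for-loop: state (i, counter, R)
def tank_a_altStep (S : List Int) (L : Int) (st : Int × Int × List Int) (j : Int) :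
    Int × Int × List Int :=
  if PySem.List.pyGetD S j 0 - PySem.List.pyGetD S st.1 0 > L then
    (j - 1, st.2.1 + 1, st.2.2 ++ [j - 1])
  else st

def tank_a_alt (P : Int) (S : List Int) (L : Int) : Int × List Int :=
  let n : Int := S.length
  let st := (PySem.List.pyRange 2 n 1).foldl (tank_a_altStep S L) (0, 0, [0])
  if 1 < n ∧ st.1 < n - 1 then (st.2.1 + 1, st.2.2 ++ [n - 1]) else (st.2.1, st.2.2)

-- ===== PRECONDITION & SPEC =====
def Spec_tank_a (P : Int) (S : List Int) (L : Int) (out : Int × List Int) : Prop := out = tank_a_alt P S L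
instance (P : Int) (S : List Int) (L : Int) (out : Int × List Int) : Decidable (Spec_tank_a P S L out) := by unfold Spec_tank_a; infer_instance

-- ===== CLAIM (what is proved, stated in full; the proofs are below) =====
def Claim_equal_tank_a : Prop := ∀ (P : Int) (S : List Int) (L : Int), Dom_tank_a P S L → Spec_tank_a P S L (tank_a P S L)

-- ===== LEMMAS AND PROOFS =====

-- the inner scan never shrinks k
theorem tank_a_inner_ge (S : List Int) (L n i : Int) :
    ∀ (fuel : Nat) (k : Int), k ≤ tank_a_inner S L n i k fuel := by
  intro fuel
  induction fuel with
  | zero => intro k; simp [tank_a_inner]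
  | succ fuel ih =>
    intro k
    rw [tank_a_inner]
    split
    · have := ih (k + 1); omega
    · omega

-- if the inner scan starts in range it ends at most at n-1
theorem tank_a_inner_le (S : List Int) (L n i : Int) :
    ∀ (fuel : Nat) (k : Int), i + k ≤ n - 1 → i + tank_a_inner S L n i k fuel ≤ n - 1 := by
  intro fuel
  induction fuel with
  | zero => intro k h; simpa [tank_a_inner] using h
  | succ fuel ih =>
    intro k h
    rw [tank_a_inner]
    split
    · next hg => exact ih (k + 1) (by omega)
    · exact h

-- lockstep: B's fold over [i+k+1, n) tracks A's inner scan at state k (fuel sufficient)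
theorem fold_inner (S : List Int) (L n i : Int) :
    ∀ (fuel : Nat) (k c : Int) (R : List Int), (n - 1 - (i + k)).toNat ≤ fuel →
    (PySem.List.pyRange (i + k + 1) n 1).foldl (tank_a_altStep S L) (i, c, R) =
      if i + tank_a_inner S L n i k fuel + 1 ≤ n - 1 then
        (PySem.List.pyRange (i + tank_a_inner S L n i k fuel + 2) n 1).foldl (tank_a_altStep S L)
          (i + tank_a_inner S L n i k fuel, c + 1, R ++ [i + tank_a_inner S L n i k fuel])
      else (i, c, R) := by
  intro fuel
  induction fuel with
  | zero =>
    intro k c R hf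
    rw [tank_a_inner, if_neg (by omega : ¬ i + k + 1 ≤ n - 1)]
    rw [PySem.List.pyRange_one_eq_nil (by omega : n ≤ i + k + 1), List.foldl_nil]
  | succ fuel ih =>
    intro k c R hf
    rw [tank_a_inner]
    split
    · next hg =>
      rw [PySem.List.pyRange_one_cons (by omega : i + k + 1 < n)]
      have hstep : tank_a_altStep S L (i, c, R) (i + k + 1) = (i, c, R) := by
        simp [tank_a_altStep]; omega
      simp only [List.foldl_cons, hstep]
      have := ih (k + 1) c R (by omega)
      rw [show i + (k + 1) + 1 = i + k + 1 + 1 by ring] at this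
      exact this
    · next hg =>
      by_cases hr : i + k + 1 ≤ n - 1
      · rw [if_pos hr]
        rw [PySem.List.pyRange_one_cons (by omega : i + k + 1 < n)]
        have hc : PySem.List.pyGetD S (i + k + 1) 0 - PySem.List.pyGetD S i 0 > L := by
          by_contra hle; exact hg ⟨hr, by omega⟩
        have hstep : tank_a_altStep S L (i, c, R) (i + k + 1) =
            (i + k, c + 1, R ++ [i + k]) := by
          simp only [tank_a_altStep, if_pos hc]
          norm_num
        simp only [List.foldl_cons, hstep]
        rw [show i + k + 2 = i + k + 1 + 1 by ring]
      · rw [if_neg hr]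
        rw [PySem.List.pyRange_one_eq_nil (by omega : n ≤ i + k + 1), List.foldl_nil]

-- A's outer loop equals B's fold over the remaining indices plus B's final append
theorem outer_fold (S : List Int) (L n : Int) :
    ∀ (fuel : Nat) (i c : Int) (R : List Int), 0 ≤ i → (n - 1 - i).toNat ≤ fuel →
    tank_a_outer S L n i c R fuel =
      (fun st : Int × Int × List Int =>
        if 1 < n ∧ st.1 < n - 1 then (st.2.1 + 1, st.2.2 ++ [n - 1]) else (st.2.1, st.2.2))
        ((PySem.List.pyRange (i + 2) n 1).foldl (tank_a_altStep S L) (i, c, R)) := by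
  intro fuel
  induction fuel with
  | zero =>
    intro i c R hi hf
    rw [tank_a_outer]
    rw [PySem.List.pyRange_one_eq_nil (by omega : n ≤ i + 2), List.foldl_nil]
    simp only
    rw [if_neg (by omega)]
  | succ fuel ih =>
    intro i c R hi hf
    rw [tank_a_outer]
    split
    · next hg =>
      have hfold := fold_inner S L n i n.toNat 1 c R (by omega)
      rw [show i + 1 + 1 = i + 2 by ring] at hfold
      rw [hfold]
      set K := tank_a_inner S L n i 1 n.toNat with hK
      have hK1 : 1 ≤ K := tank_a_inner_ge S L n i n.toNat 1
      by_cases hr : i + K + 1 ≤ n - 1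
      · rw [if_pos hr]
        exact ih (i + K) (c + 1) (R ++ [i + K]) (by omega) (by omega)
      · rw [if_neg hr]
        have h1 : i + K ≤ n - 1 := tank_a_inner_le S L n i n.toNat 1 (by omega)
        have heq : i + K = n - 1 := by omega
        rw [heq]
        have : ∀ fl : Nat, tank_a_outer S L n (n-1) (c+1) (R ++ [n-1]) fl = (c+1, R ++ [n-1]) := by
          intro fl; cases fl with
          | zero => rfl
          | succ m => rw [tank_a_outer, if_neg (by omega)]
        rw [this fuel]
        simp only
        rw [if_pos ⟨by omega, by omega⟩]
    · next hg =>
      rw [PySem.List.pyRange_one_eq_nil (by omega : n ≤ i + 2), List.foldl_nil]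
      simp only
      rw [if_neg (by omega)]

-- ===== VERDICT (by name: the statement is the Claim_ definition above) =====
theorem tank_a_spec : Claim_equal_tank_a := by
  intro P S L _
  unfold Spec_tank_a tank_a tank_a_alt
  have := outer_fold S L (S.length : Int) S.length 0 0 [0] le_rfl (by omega)
  norm_num at this ⊢
  exact this
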